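-- pv_equiv track=rewrite | github.com/PK12138/pet-memory-star | app/personality_service.py | _analyze_personality_traits
-- ===== SOURCE A (Python) =====
-- from typing import Dict, List
--
-- def _analyze_personality_traits(answers: Dict[int, str]) -> str:
--     """分析性格测试答案，提取个性化特征"""
--     traits = []
--
--     # 分析各种性格倾向
--     social_count = sum(1 for answer in answers.values() if answer in ['A', 'B'])
--     independent_count = sum(1 for answer in answers.values() if answer in ['C', 'D'])
--     active_count = sum(1 for answer in answers.values() if answer in ['A', 'C'])
--     calm_count = sum(1 for answer in answers.values() if answer in ['B', 'D'])
--
--     if social_count > independent_count: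
--         traits.append("社交性强，喜欢与人互动")
--     else:
--         traits.append("相对独立，有自己的小世界")
--
--     if active_count > calm_count:
--         traits.append("活泼好动，充满活力")
--     else:
--         traits.append("安静温和，喜欢安静时光")
--
--     # 分析具体答案模式
--     if answers.get(1) == 'A':
--         traits.append("对新环境充满好奇")
--     elif answers.get(1) == 'D':
--         traits.append("对新环境需要时间适应")
--
--     if answers.get(3) == 'A':
--         traits.append("喜欢主动表达爱意")
--     elif answers.get(3) == 'D':
--         traits.append("用安静的方式表达爱")
--
--     if answers.get(5) == 'A':
--         traits.append("情绪表达丰富")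
--     elif answers.get(5) == 'D':
--         traits.append("情绪内敛深沉")
--
--     return "，".join(traits)
-- ===== SOURCE B (Python) =====
-- def _analyze_personality_traits(answers):
--     """Single-pass rewrite: two signed differential accumulators (social-vs-
--     independent and active-vs-calm) replace the four category counts, and the
--     result string is grown by direct concatenation instead of list + join."""
--     sd = 0  # (#A + #B) - (#C + #D)
--     ad = 0  # (#A + #C) - (#B + #D)
--     for v in answers.values():
--         if v == 'A':
--             sd += 1; ad += 1
--         elif v == 'B':
--             sd += 1; ad -= 1
--         elif v == 'C':
--             sd -= 1; ad += 1
--         elif v == 'D':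
--             sd -= 1; ad -= 1
--     out = "社交性强，喜欢与人互动" if sd > 0 else "相对独立，有自己的小世界"
--     out += "，" + ("活泼好动，充满活力" if ad > 0 else "安静温和，喜欢安静时光")
--     for q, on_a, on_d in ((1, "对新环境充满好奇", "对新环境需要时间适应"),
--                           (3, "喜欢主动表达爱意", "用安静的方式表达爱"),
--                           (5, "情绪表达丰富", "情绪内敛深沉")):
--         v = answers.get(q)
--         if v == 'A':
--             out += "，" + on_a
--         elif v == 'D':
--             out += "，" + on_d
--     return out
-- ===== Notes on version B (the rewrite author's own statement) =====
-- stated objective: alternative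
-- what changed: B replaces A's four category-count passes with one pass keeping two signed differential accumulators (social-independent and active-calm, deciding each trait by the sign) and grows the result string by direct concatenation instead of building a list and joining it.
import Mathlib
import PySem

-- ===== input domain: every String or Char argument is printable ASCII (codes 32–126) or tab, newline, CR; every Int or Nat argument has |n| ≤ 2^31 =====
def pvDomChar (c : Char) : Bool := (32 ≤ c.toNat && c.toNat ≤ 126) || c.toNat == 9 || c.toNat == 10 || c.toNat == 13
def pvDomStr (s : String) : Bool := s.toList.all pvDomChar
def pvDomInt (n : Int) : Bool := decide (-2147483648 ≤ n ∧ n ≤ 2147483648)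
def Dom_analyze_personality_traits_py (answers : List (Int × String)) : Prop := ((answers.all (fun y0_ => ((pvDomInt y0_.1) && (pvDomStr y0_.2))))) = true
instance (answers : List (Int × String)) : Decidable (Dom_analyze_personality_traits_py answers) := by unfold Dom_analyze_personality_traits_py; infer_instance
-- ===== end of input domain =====

-- B replaces A's four category-count passes by one pass with two signed accumulators and builds
-- the result by direct string concatenation; the return value is proved identical.
-- ===== PORT A =====
def analyze_personality_traits_py (answers : List (Int × String)) : String :=
  let d := PySem.Dict.ofList answers
  let vals := d.values
  let social_count := vals.foldl (fun acc a => if a ∈ (["A", "B"] : List String) then acc + 1 else acc) (0 : Int)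
  let independent_count := vals.foldl (fun acc a => if a ∈ (["C", "D"] : List String) then acc + 1 else acc) (0 : Int)
  let active_count := vals.foldl (fun acc a => if a ∈ (["A", "C"] : List String) then acc + 1 else acc) (0 : Int)
  let calm_count := vals.foldl (fun acc a => if a ∈ (["B", "D"] : List String) then acc + 1 else acc) (0 : Int)
  let traits : List String := [if social_count > independent_count then "社交性强，喜欢与人互动" else "相对独立，有自己的小世界"]
  let traits := traits ++ [if active_count > calm_count then "活泼好动，充满活力" else "安静温和，喜欢安静时光"]
  let traits := if d.get? 1 = some "A" then traits ++ ["对新环境充满好奇"]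
                else if d.get? 1 = some "D" then traits ++ ["对新环境需要时间适应"] else traits
  let traits := if d.get? 3 = some "A" then traits ++ ["喜欢主动表达爱意"]
                else if d.get? 3 = some "D" then traits ++ ["用安静的方式表达爱"] else traits
  let traits := if d.get? 5 = some "A" then traits ++ ["情绪表达丰富"]
                else if d.get? 5 = some "D" then traits ++ ["情绪内敛深沉"] else traits
  PySem.Str.join "，" traits

-- ===== PORT B =====
def analyze_personality_traits_py_alt (answers : List (Int × String)) : String :=
  let d := PySem.Dict.ofList answers
  let p := d.values.foldl
    (fun (p : Int × Int) v =>
      if v = "A" then (p.1 + 1, p.2 + 1)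
      else if v = "B" then (p.1 + 1, p.2 - 1)
      else if v = "C" then (p.1 - 1, p.2 + 1)
      else if v = "D" then (p.1 - 1, p.2 - 1)
      else p) ((0 : Int), (0 : Int))
  let out := if p.1 > 0 then "社交性强，喜欢与人互动" else "相对独立，有自己的小世界"
  let out := out ++ "，" ++ (if p.2 > 0 then "活泼好动，充满活力" else "安静温和，喜欢安静时光")
  (([((1 : Int), "对新环境充满好奇", "对新环境需要时间适应"),
     ((3 : Int), "喜欢主动表达爱意", "用安静的方式表达爱"),
     ((5 : Int), "情绪表达丰富", "情绪内敛深沉")] : List (Int × String × String)).foldl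
    (fun acc qad =>
      let v := d.get? qad.1
      if v = some "A" then acc ++ "，" ++ qad.2.1
      else if v = some "D" then acc ++ "，" ++ qad.2.2 else acc) out)

-- ===== PRECONDITION & SPEC =====
def Spec_analyze_personality_traits_py (answers : List (Int × String)) (out : String) : Prop := out = analyze_personality_traits_py_alt answers
instance (answers : List (Int × String)) (out : String) : Decidable (Spec_analyze_personality_traits_py answers out) := by unfold Spec_analyze_personality_traits_py; infer_instance

-- ===== CLAIM =====
def Claim_equal_analyze_personality_traits_py : Prop := ∀ (answers : List (Int × String)), Dom_analyze_personality_traits_py answers → Spec_analyze_personality_traits_py answers (analyze_personality_traits_py answers)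

-- ===== LEMMAS AND PROOFS =====

-- A's 0/1-sum over a two-letter membership test equals the sum of the two counts.
theorem pv_count2 (x y : String) (hxy : x ≠ y) (l : List String) (c : Int) :
    l.foldl (fun acc a => if a ∈ ([x, y] : List String) then acc + 1 else acc) c
      = c + (l.count x : Int) + (l.count y : Int) := by
  induction l generalizing c with
  | nil => simp
  | cons h t ih =>
    simp only [List.foldl, List.count_cons]
    by_cases hx : h = x
    · rw [ih]; simp [hx, if_neg hxy]; ring
    · by_cases hy : h = y
      · rw [ih]; simp [hy, if_neg hxy, if_neg (Ne.symm hxy)]; ring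
      · rw [ih]; simp [hx, hy]

-- B's single pass with two signed accumulators equals the count differences.
theorem pv_pair (l : List String) (p : Int × Int) :
    l.foldl
      (fun (p : Int × Int) v =>
        if v = "A" then (p.1 + 1, p.2 + 1)
        else if v = "B" then (p.1 + 1, p.2 - 1)
        else if v = "C" then (p.1 - 1, p.2 + 1)
        else if v = "D" then (p.1 - 1, p.2 - 1)
        else p) p
      = (p.1 + (l.count "A" : Int) + l.count "B" - l.count "C" - l.count "D",
         p.2 + (l.count "A" : Int) + l.count "C" - l.count "B" - l.count "D") := by
  induction l generalizing p with
  | nil => simp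
  | cons h t ih =>
    simp only [List.foldl, List.count_cons]
    rw [ih]
    by_cases hA : h = "A"
    · simp [hA]; constructor <;> ring
    · by_cases hB : h = "B"
      · simp [hA, hB]; constructor <;> ring
      · by_cases hC : h = "C"
        · simp [hA, hB, hC]; constructor <;> ring
        · by_cases hD : h = "D"
          · simp [hA, hB, hC, hD]; constructor <;> ring
          · simp [hA, hB, hC, hD]

-- ===== VERDICT =====
set_option maxHeartbeats 2000000 in
set_option maxRecDepth 8000 in
theorem analyze_personality_traits_py_spec : Claim_equal_analyze_personality_traits_py := by
  intro answers _
  unfold Spec_analyze_personality_traits_py analyze_personality_traits_py analyze_personality_traits_py_alt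
  simp only [List.foldl, pv_pair,
    pv_count2 "A" "B" (by decide), pv_count2 "C" "D" (by decide),
    pv_count2 "A" "C" (by decide), pv_count2 "B" "D" (by decide)]
  have e1 : ∀ a b c d : Int,
      ((0 : Int) + a + b - c - d > 0) ↔ ((0 : Int) + a + b > 0 + c + d) := by omega
  simp only [e1]
  split_ifs <;> decide
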